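-- pv_equiv track=rewrite | github.com/jrandolph614/Data_Science_Master | thinkPython/go 2/chapter9/chapter9.py | doubleLetter
-- ===== SOURCE A (Python) =====
-- def doubleLetter(s):
--     i = 0
--     count =0
--     while i <len(s)-1:
--         if s[i] == s[i+1]:
--             count +=1
--             if count ==3:
--                 return True
--             i+=2
--         else:
--             i=i+1-2*count
--             count =0
--     return False
-- ===== SOURCE B (Python) =====
-- def doubleLetter(s):
--     for i in range(len(s) - 5):
--         if s[i] == s[i + 1] and s[i + 2] == s[i + 3] and s[i + 4] == s[i + 5]:
--             return True
--     return False
-- ===== Notes on version B (the rewrite author's own statement) =====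
-- stated objective: simpler
-- what changed: Replaces the stateful while-loop with count tracking and i+1-2*count backtracking by a plain scan over start positions that checks the three doubled pairs of each six-character window directly.
import Mathlib
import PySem

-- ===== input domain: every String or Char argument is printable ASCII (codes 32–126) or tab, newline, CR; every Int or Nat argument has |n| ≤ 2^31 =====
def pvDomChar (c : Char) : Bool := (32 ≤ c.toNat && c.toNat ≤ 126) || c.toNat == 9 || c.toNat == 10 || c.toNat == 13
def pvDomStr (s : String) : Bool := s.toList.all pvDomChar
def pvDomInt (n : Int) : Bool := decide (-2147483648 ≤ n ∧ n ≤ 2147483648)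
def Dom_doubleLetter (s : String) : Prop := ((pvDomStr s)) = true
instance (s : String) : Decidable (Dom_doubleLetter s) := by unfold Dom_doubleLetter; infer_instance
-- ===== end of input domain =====

-- B replaces A's stateful while-loop (count + i+1-2*count backtracking) by a plain
-- scan of start positions checking the three doubled pairs of each 6-char window; objective: simpler.

-- ===== PORT A =====
-- A's while loop, state (i, count) as in the Python; the Nat fuel argument only makes the
-- loop total (one unit per iteration; 3*len+3 provably suffices, lemma pvLoop_iff below)
def doubleLetterLoop (l : List Char) (i : Int) (count : Int) : Nat → Bool
  | 0 => false
  | fuel + 1 =>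
    if i < (l.length : Int) - 1 then
      if PySem.List.pyGet? l i == PySem.List.pyGet? l (i + 1) then
        if count + 1 = 3 then true
        else doubleLetterLoop l (i + 2) (count + 1) fuel
      else doubleLetterLoop l (i + 1 - 2 * count) 0 fuel
    else false

def doubleLetter (s : String) : Bool :=
  doubleLetterLoop s.toList 0 0 (3 * s.toList.length + 3)

-- ===== PORT B =====
-- for i in range(len(s)-5): three pair checks, early return True = List.any
def doubleLetter_alt (s : String) : Bool :=
  let l := s.toList
  (PySem.List.pyRange 0 ((l.length : Int) - 5) 1).any fun i =>
    (PySem.List.pyGet? l i == PySem.List.pyGet? l (i + 1)) &&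
    (PySem.List.pyGet? l (i + 2) == PySem.List.pyGet? l (i + 3)) &&
    (PySem.List.pyGet? l (i + 4) == PySem.List.pyGet? l (i + 5))

-- ===== PRECONDITION & SPEC =====
def Spec_doubleLetter (s : String) (out : Bool) : Prop := out = doubleLetter_alt s
instance (s : String) (out : Bool) : Decidable (Spec_doubleLetter s out) := by unfold Spec_doubleLetter; infer_instance

-- ===== CLAIM (what is proved, stated in full; the proofs are below) =====
def Claim_equal_doubleLetter : Prop := ∀ (s : String), Dom_doubleLetter s → Spec_doubleLetter s (doubleLetter s)

-- ===== LEMMAS AND PROOFS =====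

-- a "window" at start q: three consecutive doubled pairs inside the string
def pvWin (l : List Char) (q : Nat) : Prop :=
  q + 6 ≤ l.length ∧ l[q]? = l[q+1]? ∧ l[q+2]? = l[q+3]? ∧ l[q+4]? = l[q+5]?

-- key invariant lemma: at state i = p + 2*count with the first `count` pairs of
-- window p already matched and enough fuel left, the loop returns true iff some
-- window starts at q ≥ p
theorem pvLoop_iff (l : List Char) (fuel : Nat) (p count : Nat) (h : count ≤ 2)
    (hf : 3 * (l.length - p) + 3 - count ≤ fuel)
    (hm : ∀ j, j < count → l[p + 2*j]? = l[p + 2*j + 1]?) :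
    doubleLetterLoop l (↑(p + 2*count)) (↑count) fuel = true ↔ ∃ q, p ≤ q ∧ pvWin l q := by
  induction fuel generalizing p count with
  | zero => omega
  | succ fuel ih =>
    rw [doubleLetterLoop]
    by_cases hi : ((p + 2*count : Nat) : Int) < (l.length : Int) - 1
    · rw [if_pos hi]
      have hlt : p + 2*count + 1 < l.length := by omega
      have hcast : ∀ (k : Nat), PySem.List.pyGet? l ((p + 2*count : Nat) + (k : Int)) = l[p + 2*count + k]? := by
        intro k
        have : ((p + 2*count : Nat) : Int) + (k : Int) = ((p + 2*count + k : Nat) : Int) := by push_cast; ring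
        rw [this, PySem.List.pyGet?_natCast]
      have h0 : PySem.List.pyGet? l ((p + 2*count : Nat) : Int) = l[p + 2*count]? :=
        PySem.List.pyGet?_natCast l _
      by_cases heq : l[p + 2*count]? = l[p + 2*count + 1]?
      · have hbeq : (PySem.List.pyGet? l ((p + 2*count : Nat) : Int) ==
            PySem.List.pyGet? l (((p + 2*count : Nat) : Int) + 1)) = true := by
          have := hcast 1
          simp only [Nat.cast_one] at this
          rw [h0, this]
          exact beq_iff_eq.mpr heq
        rw [if_pos hbeq]
        by_cases h3 : ((count : Int) + 1 = 3)
        · rw [if_pos h3]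
          have hc2 : count = 2 := by omega
          constructor
          · intro _
            refine ⟨p, le_refl p, ?_, ?_, ?_, ?_⟩
            · omega
            · have := hm 0 (by omega); simpa using this
            · have := hm 1 (by omega); simpa using this
            · have : p + 2*count = p + 4 := by omega
              rw [this] at heq
              simpa using heq
          · intro _; rfl
        · rw [if_neg h3]
          have hcc : ¬ (count + 1 = 3) := by
            intro hc; exact h3 (by exact_mod_cast congrArg (Nat.cast : Nat → Int) hc)
          have hstep : ((p + 2*count : Nat) : Int) + 2 = ((p + 2*(count+1) : Nat) : Int) := by
            push_cast; ring
          have hstepc : ((count : Nat) : Int) + 1 = ((count + 1 : Nat) : Int) := by push_cast; ring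
          rw [hstep, hstepc]
          refine ih p (count+1) (by omega) (by omega) ?_
          intro j hj
          by_cases hjc : j = count
          · subst hjc; exact heq
          · exact hm j (by omega)
      · have hbeq : (PySem.List.pyGet? l ((p + 2*count : Nat) : Int) ==
            PySem.List.pyGet? l (((p + 2*count : Nat) : Int) + 1)) = false := by
          have := hcast 1
          simp only [Nat.cast_one] at this
          rw [h0, this]
          exact beq_eq_false_iff_ne.mpr heq
        rw [if_neg (by rw [hbeq]; decide)]
        have hstep : ((p + 2*count : Nat) : Int) + 1 - 2 * ((count : Nat) : Int) = ((p + 1 : Nat) : Int) := by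
          push_cast; ring
        have hz : (0 : Int) = ((0 : Nat) : Int) := by norm_num
        rw [hstep, hz]
        rw [ih (p+1) 0 (by omega) (by omega) (by intro j hj; omega)]
        constructor
        · rintro ⟨q, hq, hw⟩; exact ⟨q, by omega, hw⟩
        · rintro ⟨q, hq, hw⟩
          refine ⟨q, ?_, hw⟩
          rcases Nat.lt_or_ge p q with hlt' | hge
          · omega
          · exfalso
            have hqp : q = p := by omega
            subst hqp
            obtain ⟨_, w0, w1, w2⟩ := hw
            interval_cases count
            · exact heq (by simpa using w0)
            · exact heq (by simpa using w1)
            · exact heq (by simpa using w2)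
    · rw [if_neg hi]
      simp only [Bool.false_eq_true, false_iff]
      rintro ⟨q, hq, hw, -⟩
      omega

theorem pvAlt_iff (s : String) : doubleLetter_alt s = true ↔ ∃ q, pvWin s.toList q := by
  unfold doubleLetter_alt
  simp only [List.any_eq_true, PySem.List.mem_pyRange_one]
  constructor
  · rintro ⟨i, ⟨h0, hlt⟩, hp⟩
    refine ⟨i.toNat, ?_⟩
    have hi : i = ((i.toNat : Nat) : Int) := by omega
    rw [hi] at hp hlt
    have hcast : ∀ (k : Nat), PySem.List.pyGet? s.toList ((i.toNat : Int) + (k : Int)) = s.toList[i.toNat + k]? := by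
      intro k
      have : ((i.toNat : Nat) : Int) + (k : Int) = ((i.toNat + k : Nat) : Int) := by push_cast; ring
      rw [this, PySem.List.pyGet?_natCast]
    simp only [Bool.and_eq_true, beq_iff_eq] at hp
    have c1 := hcast 1; have c2 := hcast 2; have c3 := hcast 3
    have c4 := hcast 4; have c5 := hcast 5
    simp only [Nat.cast_one, Nat.cast_ofNat] at c1 c2 c3 c4 c5
    rw [PySem.List.pyGet?_natCast, c1, c2, c3, c4, c5] at hp
    exact ⟨by omega, hp.1.1, hp.1.2, hp.2⟩
  · rintro ⟨q, hlen, w0, w1, w2⟩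
    refine ⟨(q : Int), ⟨by omega, by omega⟩, ?_⟩
    have hcast : ∀ (k : Nat), PySem.List.pyGet? s.toList ((q : Int) + (k : Int)) = s.toList[q + k]? := by
      intro k
      have : ((q : Nat) : Int) + (k : Int) = ((q + k : Nat) : Int) := by push_cast; ring
      rw [this, PySem.List.pyGet?_natCast]
    have c1 := hcast 1; have c2 := hcast 2; have c3 := hcast 3
    have c4 := hcast 4; have c5 := hcast 5
    simp only [Nat.cast_one, Nat.cast_ofNat] at c1 c2 c3 c4 c5
    rw [PySem.List.pyGet?_natCast, c1, c2, c3, c4, c5]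
    simp [w0, w1, w2]

-- ===== VERDICT (by name: the statement is the Claim_ definition above) =====
theorem doubleLetter_spec : Claim_equal_doubleLetter := by
  intro s _
  unfold Spec_doubleLetter
  have hA : doubleLetter s = true ↔ ∃ q, pvWin s.toList q := by
    unfold doubleLetter
    have := pvLoop_iff s.toList (3 * s.toList.length + 3) 0 0 (by omega) (by omega)
      (by intro j hj; omega)
    simp only [Nat.mul_zero, Nat.add_zero, Nat.cast_zero] at this
    rw [this]
    constructor
    · rintro ⟨q, -, hw⟩; exact ⟨q, hw⟩
    · rintro ⟨q, hw⟩; exact ⟨q, Nat.zero_le q, hw⟩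
  rw [Bool.eq_iff_iff, hA, pvAlt_iff s]
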